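-- pv_equiv track=rewrite | github.com/izlotnik/scrabble-helper | app/word_finder.py | apply_top
-- ===== SOURCE A (Python) =====
-- def group_by_length(results: list[tuple[str, int, int]]) -> dict[int, list[tuple[str, int, int]]]:
--     """Group (word, score, rack_tiles) list into {length: [...]} sorted by length desc."""
--     groups: dict[int, list[tuple[str, int, int]]] = {}
--     for word, sc, rt in results:
--         groups.setdefault(len(word), []).append((word, sc, rt))
--     return dict(sorted(groups.items(), reverse=True))
--
-- def apply_top(
--     results: list[tuple[str, int, int]],
--     top_n: int,
--     per_group: bool = False,
-- ) -> dict[int, list[tuple[str, int, int]]]: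
--     """
--     Apply optional top-N limit then group by word length.
--
--     top_n=0       — no limit, return all
--     per_group=False — take the N highest-scoring words overall, then group
--     per_group=True  — group first, then keep the top N within each length bucket
--     """
--     if per_group:
--         grouped = group_by_length(results)
--         if top_n:
--             grouped = {k: v[:top_n] for k, v in grouped.items()}
--         return grouped
--     else:
--         if top_n:
--             results = results[:top_n]
--         return group_by_length(results)
-- ===== SOURCE B (Python) =====
-- def apply_top(results, top_n, per_group=False):
--     if per_group:
--         pool = results
--         limit = top_n if top_n else None
--     else:
--         pool = results[:top_n] if top_n else results
--         limit = None
--     lengths = sorted({len(w) for w, _, _ in pool}, reverse=True)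
--     return {L: [r for r in pool if len(r[0]) == L][:limit] for L in lengths}
-- ===== Notes on version B (the rewrite author's own statement) =====
-- stated objective: simpler
-- what changed: Replaces the dict setdefault-bucketing plus sort-of-items with a single dict comprehension: sort the distinct word lengths descending once, then build each bucket by one filter pass over the (possibly top-N-sliced) pool.
import Mathlib
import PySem

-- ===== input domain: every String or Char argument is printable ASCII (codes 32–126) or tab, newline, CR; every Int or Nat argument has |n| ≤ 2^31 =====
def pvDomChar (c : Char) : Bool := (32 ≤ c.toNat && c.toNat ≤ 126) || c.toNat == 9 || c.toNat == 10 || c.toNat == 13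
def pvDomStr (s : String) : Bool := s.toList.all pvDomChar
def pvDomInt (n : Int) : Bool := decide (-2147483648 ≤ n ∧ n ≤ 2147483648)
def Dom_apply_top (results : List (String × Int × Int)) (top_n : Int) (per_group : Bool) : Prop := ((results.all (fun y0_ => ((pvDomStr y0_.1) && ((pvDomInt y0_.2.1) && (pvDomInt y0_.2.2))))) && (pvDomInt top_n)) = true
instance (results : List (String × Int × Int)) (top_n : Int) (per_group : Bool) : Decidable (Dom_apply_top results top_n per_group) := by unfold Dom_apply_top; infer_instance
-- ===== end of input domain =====

-- B replaces A's dict setdefault-bucketing with "sorted distinct lengths, then one filter per length"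
-- (objective: simpler); equivalence proved on all inputs.

-- ===== PORT A =====
-- The Python dict is rendered as its items association list. `sorted(groups.items(), reverse=True)`
-- compares (key, value) tuples, but the dict's keys are distinct so the comparison never reaches the
-- value lists: it is ported exactly as sorting by the first component. `groups.setdefault(len(word),
-- []).append(x)` is `modify` at key len(word) with default [] appending x (Dict.modify = d[k] = f(d.get(k, dflt))).
def group_by_length (results : List (String × Int × Int)) : List (Int × List (String × Int × Int)) :=
  let groups : PySem.Dict Int (List (String × Int × Int)) :=
    results.foldl (fun d r => d.modify (PySem.Str.len r.1) [] (fun v => v ++ [r])) PySem.Dict.empty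
  PySem.List.sorted groups.items (fun p => p.1) true

def apply_top (results : List (String × Int × Int)) (top_n : Int) (per_group : Bool) : List (Int × List (String × Int × Int)) :=
  if per_group then
    let grouped := group_by_length results
    if top_n ≠ 0 then grouped.map (fun p => (p.1, PySem.List.slice p.2 none (some top_n))) else grouped
  else
    let results' := if top_n ≠ 0 then PySem.List.slice results none (some top_n) else results
    group_by_length results'

-- ===== PORT B =====
-- Source B: pick the pool and the per-bucket limit, sort the distinct word lengths descending,
-- then one filter (+ optional slice, `[:None]` = whole list) per length.
def apply_top_alt (results : List (String × Int × Int)) (top_n : Int) (per_group : Bool) : List (Int × List (String × Int × Int)) :=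
  let pool := if per_group then results else if top_n ≠ 0 then PySem.List.slice results none (some top_n) else results
  let limit : Option Int := if per_group then (if top_n ≠ 0 then some top_n else none) else none
  let lengths := PySem.List.sorted (PySem.Set.ofList (pool.map (fun r => PySem.Str.len r.1))) (fun x => x) true
  lengths.map (fun L => (L, PySem.List.slice (pool.filter (fun r => PySem.Str.len r.1 == L)) none limit))

-- ===== PRECONDITION & SPEC =====
def Spec_apply_top (results : List (String × Int × Int)) (top_n : Int) (per_group : Bool) (out : List (Int × List (String × Int × Int))) : Prop := out = apply_top_alt results top_n per_group
instance (results : List (String × Int × Int)) (top_n : Int) (per_group : Bool) (out : List (Int × List (String × Int × Int))) : Decidable (Spec_apply_top results top_n per_group out) := by unfold Spec_apply_top; infer_instance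

-- ===== CLAIM (what is proved, stated in full; the proofs are below) =====
def Claim_equal_apply_top : Prop := ∀ (results : List (String × Int × Int)) (top_n : Int) (per_group : Bool), Dom_apply_top results top_n per_group → Spec_apply_top results top_n per_group (apply_top results top_n per_group)

-- ===== LEMMAS AND PROOFS =====

-- A's grouping equals "sorted distinct lengths descending, paired with their filters".
theorem group_by_length_eq (rs : List (String × Int × Int)) :
    group_by_length rs =
      (PySem.List.sorted (PySem.Set.ofList (rs.map (fun r => PySem.Str.len r.1))) (fun x => x) true).map
        (fun L => (L, rs.filter (fun r => PySem.Str.len r.1 == L))) := by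
  unfold group_by_length
  show PySem.List.sorted (rs.foldl (fun d r => d.modify (PySem.Str.len r.1) [] (fun v => v ++ [r])) PySem.Dict.empty).items (fun p => p.1) true = _
  set D := rs.foldl (fun d r => d.modify (PySem.Str.len r.1) [] (fun v => v ++ [r])) PySem.Dict.empty with hD
  have hkeys : D.keys = PySem.Set.ofList (rs.map (fun r => PySem.Str.len r.1)) := by
    rw [hD, PySem.Dict.keys_foldl_modify_key rs (fun r => PySem.Str.len r.1) []
      (fun _ r => (fun v => v ++ [r])) PySem.Dict.empty, PySem.Dict.keys_empty,
      PySem.Set.ofList_eq_foldl]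
    rfl
  have hnodup : D.keys.Nodup := by rw [hkeys]; exact PySem.Set.nodup_ofList _
  have hgetD : ∀ c, D.getD c [] = rs.filter (fun r => PySem.Str.len r.1 == c) := by
    intro c
    have hfold : D = (rs.map (fun r => (PySem.Str.len r.1, r))).foldl
        (fun d p => d.modify p.1 [] (fun v => v ++ [p.2])) PySem.Dict.empty := by
      rw [hD, List.foldl_map]
    rw [hfold, PySem.Dict.getD_foldl_modify_append, PySem.Dict.getD_empty, List.filter_map]
    simp [Function.comp_def]
  have hitems : D.items = (PySem.Set.ofList (rs.map (fun r => PySem.Str.len r.1))).map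
      (fun L => (L, rs.filter (fun r => PySem.Str.len r.1 == L))) := by
    rw [PySem.Dict.items_eq_map_keys D hnodup [], hkeys]
    exact List.map_congr_left (fun k _ => by rw [hgetD k])
  rw [hitems]
  apply PySem.List.sorted_rev_eq_of_perm_of_pairwise_gt
  · exact ((PySem.List.sorted_perm _ _ _).map _)
  · rw [List.pairwise_map]
    have h1 := PySem.List.sorted_pairwise_rev
      (PySem.Set.ofList (rs.map (fun r => PySem.Str.len r.1))) (fun x => x)
    have h2 : (PySem.List.sorted (PySem.Set.ofList (rs.map (fun r => PySem.Str.len r.1)))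
        (fun x => x) true).Nodup :=
      (PySem.List.sorted_perm _ _ _).nodup_iff.mpr (PySem.Set.nodup_ofList _)
    exact (h1.and h2).imp (fun ⟨hle, hne⟩ => lt_of_le_of_ne hle (Ne.symm hne))

-- ===== VERDICT (by name: the statement is the Claim_ definition above) =====
theorem apply_top_spec : Claim_equal_apply_top := by
  intro results top_n per_group _
  show apply_top results top_n per_group = apply_top_alt results top_n per_group
  unfold apply_top apply_top_alt
  cases per_group with
  | false =>
    simp only [Bool.false_eq_true, if_false]
    rw [group_by_length_eq]
    simp [PySem.List.slice_none_none]
  | true =>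
    simp only [if_true]
    by_cases h : top_n = 0
    · simp only [h, ne_eq, not_true_eq_false, if_false]
      rw [group_by_length_eq]
      simp [PySem.List.slice_none_none]
    · simp only [ne_eq, h, not_false_eq_true, if_true]
      rw [group_by_length_eq, List.map_map]
      simp [Function.comp_def]
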